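-- pv_equiv track=rewrite | github.com/ms-jpq/coq_nvim | rplugin/python3/nap/clients/dictionary.py | parse_cword
-- ===== SOURCE A (Python) =====
-- from typing import Any, AsyncIterator, Dict, Iterator, Sequence, Tuple
--
-- def parse_cword(word: str) -> str:
--     def cont() -> Iterator[str]:
--         for c in reversed(word):
--             if c.isalnum():
--                 yield c
--             else:
--                 break
--
--     cword = "".join(cont())[::-1]
--     return cword
-- ===== SOURCE B (Python) =====
-- def parse_cword(word: str) -> str:
--     idx = 0
--     for i, c in enumerate(word):
--         if not c.isalnum():
--             idx = i + 1
--     return word[idx:]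
-- ===== Notes on version B (the rewrite author's own statement) =====
-- stated objective: simpler
-- what changed: Replaces the reverse-generator-join-reverse pipeline with a single forward pass that records the position after the last non-alphanumeric character and slices once.
import Mathlib
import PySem

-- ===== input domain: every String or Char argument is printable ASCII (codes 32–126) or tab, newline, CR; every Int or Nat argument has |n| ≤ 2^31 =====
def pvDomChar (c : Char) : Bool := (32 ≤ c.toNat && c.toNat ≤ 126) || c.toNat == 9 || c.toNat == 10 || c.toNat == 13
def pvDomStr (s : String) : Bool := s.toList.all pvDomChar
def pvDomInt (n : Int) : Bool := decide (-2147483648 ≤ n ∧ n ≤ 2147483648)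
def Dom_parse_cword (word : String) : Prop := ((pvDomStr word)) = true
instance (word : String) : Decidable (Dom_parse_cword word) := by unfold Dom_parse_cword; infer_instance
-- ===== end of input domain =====

-- B replaces A's reverse-generator-join-reverse with one forward pass locating the
-- boundary after the last non-alphanumeric character and a single slice (simpler).

-- ===== PORT A =====
-- the generator yields chars of reversed(word) while isalnum, else breaks = takeWhile;
-- "".join collects them; [::-1] reverses (PySem.List.slice?_none_none_neg_one: s[::-1] is reverse)
def parse_cword (word : String) : String :=
  let cont := (word.toList.reverse).takeWhile PySem.Chars.isalnum
  String.ofList cont.reverse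

-- ===== PORT B =====
def parse_cword_alt (word : String) : String :=
  let l := word.toList
  let idx : Int :=
    (PySem.List.enumerate l 0).foldl
      (fun idx p => if PySem.Chars.isalnum p.2 then idx else p.1 + 1) 0
  String.ofList (PySem.List.slice l (some idx) none)

-- ===== PRECONDITION & SPEC =====
def Spec_parse_cword (word : String) (out : String) : Prop := out = parse_cword_alt word
instance (word : String) (out : String) : Decidable (Spec_parse_cword word out) := by unfold Spec_parse_cword; infer_instance

-- ===== CLAIM (what is proved, stated in full; the proofs are below) =====
def Claim_equal_parse_cword : Prop := ∀ (word : String), Dom_parse_cword word → Spec_parse_cword word (parse_cword word)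

-- ===== LEMMAS AND PROOFS =====

-- invariant of B's forward pass: the final index is nonnegative, within bounds, and the
-- slice from it is exactly the reversed alnum prefix of the reversed list (= A's value)
lemma pv_key (l : List Char) :
    0 ≤ (PySem.List.enumerate l 0).foldl
        (fun idx p => if PySem.Chars.isalnum p.2 then idx else p.1 + 1) 0 ∧
    (PySem.List.enumerate l 0).foldl
        (fun idx p => if PySem.Chars.isalnum p.2 then idx else p.1 + 1) 0 ≤ (l.length : Int) ∧
    PySem.List.slice l
      (some ((PySem.List.enumerate l 0).foldl
        (fun idx p => if PySem.Chars.isalnum p.2 then idx else p.1 + 1) 0)) none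
      = (l.reverse.takeWhile PySem.Chars.isalnum).reverse := by
  induction l using List.reverseRecOn with
  | nil => simp [PySem.List.enumerate, PySem.List.slice_from ([] : List Char) (le_refl (0:Int))]
  | append_singleton l c ih =>
    obtain ⟨h0, hle, hsl⟩ := ih
    rw [PySem.List.enumerate_append, List.foldl_append]
    simp only [PySem.List.enumerate, List.foldl_cons, List.foldl_nil]
    by_cases hc : PySem.Chars.isalnum c
    · refine ⟨by simpa [hc] using h0, ?_, ?_⟩
      · simp only [hc, if_pos]
        simp only [List.length_append, List.length_cons, List.length_nil]
        omega
      · simp only [hc, if_pos]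
        rw [PySem.List.slice_from l h0] at hsl
        rw [PySem.List.slice_from (l ++ [c]) h0]
        have hnat : (((PySem.List.enumerate l 0).foldl
            (fun idx (p : Int × Char) => if PySem.Chars.isalnum p.2 then idx else p.1 + 1) 0)).toNat
            ≤ l.length := by omega
        rw [List.drop_append_of_le_length hnat, hsl]
        simp [hc]
    · simp only [hc, if_neg, Bool.false_eq_true, not_false_iff]
      refine ⟨by positivity, ?_, ?_⟩
      · simp
      · simp only [zero_add]
        have hpos : (0:Int) ≤ (l.length : Int) + 1 := by positivity
        rw [PySem.List.slice_from (l ++ [c]) hpos]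
        have : ((l.length : Int) + 1).toNat = l.length + 1 := by omega
        rw [this]
        simp [hc, List.drop_eq_nil_of_le]

-- ===== VERDICT (by name: the statement is the Claim_ definition above) =====
theorem parse_cword_spec : Claim_equal_parse_cword := by
  intro word _
  unfold Spec_parse_cword parse_cword parse_cword_alt
  simp only
  rw [(pv_key word.toList).2.2]
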